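-- pv_equiv track=rewrite | github.com/Abhilash-du/daily-coding-challenges | DataStructures/Queue/firstNonRepeatingCharacter.py | solve
-- ===== SOURCE A (Python) =====
-- def solve(A):
--     queue = []
--     hmap = {}  # stores the frequency of each character
--     ans = ""
--     for val in A:
--         if val not in hmap.keys():
--             # if value is unique
--             hmap[val] = 1
--             queue.append(val)
--         else:
--             # if value is repeated
--             hmap[val] += 1
--             while queue and hmap[queue[0]] > 1:
--                 queue.pop(0)
--         if queue:
--             ans += queue[0]
--         else:
--             ans += "#"
--     return ans
-- ===== SOURCE B (Python) =====
-- def solve(A):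
--     counts = {}
--     order = []   # characters in first-appearance order
--     ans = ""
--     for ch in A:
--         if ch in counts:
--             counts[ch] += 1
--         else:
--             counts[ch] = 1
--             order.append(ch)
--         first = next((c for c in order if counts[c] == 1), None)
--         ans += first if first is not None else '#'
--     return ans
-- ===== Notes on version B (the rewrite author's own statement) =====
-- stated objective: simpler
-- what changed: Replaces A's lazily pruned queue (with its inner while-pop loop maintaining a head invariant) by a frequency dict plus a first-appearance order list that is freshly scanned for the first count-1 character at every step.
import Mathlib
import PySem

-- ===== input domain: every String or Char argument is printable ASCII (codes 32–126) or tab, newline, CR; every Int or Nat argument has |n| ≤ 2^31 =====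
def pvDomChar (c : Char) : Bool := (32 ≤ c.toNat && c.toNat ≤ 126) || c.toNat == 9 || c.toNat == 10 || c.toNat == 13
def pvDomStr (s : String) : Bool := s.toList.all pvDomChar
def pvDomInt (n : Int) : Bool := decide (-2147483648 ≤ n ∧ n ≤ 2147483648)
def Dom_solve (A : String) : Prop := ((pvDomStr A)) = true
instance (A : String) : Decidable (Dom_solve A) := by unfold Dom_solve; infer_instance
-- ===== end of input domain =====

-- B replaces A's lazily pruned queue by a count dict plus a first-appearance order
-- list rescanned each step (objective: simpler; no speed claim).

-- ===== PORT A =====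
-- the 'while queue and hmap[queue[0]] > 1: queue.pop(0)' loop
-- (hmap[queue[0]] ported as getD _ 0: exact here, queue elements are always keys)
def pruneA (h : PySem.Dict Char Int) : List Char → List Char
  | [] => []
  | c :: rest => if h.getD c 0 > 1 then pruneA h rest else c :: rest

def stepA (st : List Char × PySem.Dict Char Int × String) (val : Char) :
    List Char × PySem.Dict Char Int × String :=
  let qh : List Char × PySem.Dict Char Int :=
    if !(st.2.1.contains val) then
      (st.1 ++ [val], st.2.1.insert val 1)
    else
      let h2 := st.2.1.insert val (st.2.1.getD val 0 + 1)
      (pruneA h2 st.1, h2)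
  match qh.1 with
  | c :: _ => (qh.1, qh.2, st.2.2.push c)
  | [] => (qh.1, qh.2, st.2.2.push '#')

def solve (A : String) : String :=
  (A.toList.foldl stepA ([], PySem.Dict.empty, "")).2.2

-- ===== PORT B =====
-- next((c for c in order if counts[c] == 1), None)
def firstUnique (cnt : PySem.Dict Char Int) (order : List Char) : Option Char :=
  order.find? (fun c => cnt.getD c 0 == 1)

def stepB (st : PySem.Dict Char Int × List Char × String) (val : Char) :
    PySem.Dict Char Int × List Char × String :=
  let co : PySem.Dict Char Int × List Char :=
    if st.1.contains val then
      (st.1.insert val (st.1.getD val 0 + 1), st.2.1)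
    else
      (st.1.insert val 1, st.2.1 ++ [val])
  match firstUnique co.1 co.2 with
  | some c => (co.1, co.2, st.2.2.push c)
  | none => (co.1, co.2, st.2.2.push '#')

def solve_alt (A : String) : String :=
  (A.toList.foldl stepB (PySem.Dict.empty, [], "")).2.2

-- ===== PRECONDITION & SPEC =====
def Spec_solve (A : String) (out : String) : Prop := out = solve_alt A
instance (A : String) (out : String) : Decidable (Spec_solve A out) := by unfold Spec_solve; infer_instance

-- ===== CLAIM (what is proved, stated in full; the proofs are below) =====
def Claim_equal_solve : Prop := ∀ (A : String), Dom_solve A → Spec_solve A (solve A)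

-- ===== LEMMAS AND PROOFS =====

lemma find?_append_none {α : Type} (p : α → Bool) (l₁ l₂ : List α)
    (h : ∀ x ∈ l₁, p x = false) :
    List.find? p (l₁ ++ l₂) = List.find? p l₂ := by
  induction l₁ with
  | nil => rfl
  | cons a t ih =>
    simp only [List.cons_append, List.find?_cons, h a (by simp)]
    exact ih (fun x hx => h x (by simp [hx]))

lemma prune_spec (h : PySem.Dict Char Int) (q : List Char) :
    ∃ pre, q = pre ++ pruneA h q ∧ (∀ c ∈ pre, h.getD c 0 > 1) ∧
      (∀ c rest, pruneA h q = c :: rest → ¬ h.getD c 0 > 1) := by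
  induction q with
  | nil => exact ⟨[], rfl, by simp, by simp [pruneA]⟩
  | cons c rest ih =>
    by_cases hgt : h.getD c 0 > 1
    · obtain ⟨pre, he, hp, hh⟩ := ih
      refine ⟨c :: pre, ?_, ?_, ?_⟩
      · simpa [pruneA, hgt] using he
      · intro x hx; rcases List.mem_cons.mp hx with hx | hx
        · exact hx ▸ hgt
        · exact hp x hx
      · simpa [pruneA, hgt] using hh
    · refine ⟨[], by simp [pruneA, hgt], by simp, ?_⟩
      intro c' rest' he
      simp only [pruneA, if_neg hgt] at he
      cases he; exact hgt

lemma main_lemma (l : List Char) :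
    ∀ (q : List Char) (h : PySem.Dict Char Int) (dropped : List Char) (ans : String),
    (∀ c ∈ dropped, h.getD c 0 > 1) →
    (∀ c ∈ q, h.getD c 0 ≥ 1) →
    (∀ c rest, q = c :: rest → h.getD c 0 = 1) →
    (l.foldl stepA (q, h, ans)).2.2 = (l.foldl stepB (h, dropped ++ q, ans)).2.2 := by
  induction l with
  | nil => intro q h dropped ans _ _ _; rfl
  | cons val l ih =>
    intro q h dropped ans hdrop hq hhead
    simp only [List.foldl_cons]
    by_cases hc : h.contains val = true
    · -- repeated character: A increments and prunes; B increments and rescans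
      set h2 := h.insert val (h.getD val 0 + 1) with hh2
      obtain ⟨pre, hqe, hpre, hph⟩ := prune_spec h2 q
      have hmono : ∀ c, h.getD c 0 ≤ h2.getD c 0 := by
        intro c
        rw [hh2, PySem.Dict.getD_insert]
        split_ifs with he
        · subst he; omega
        · exact le_refl _
      have hq2 : ∀ c ∈ q, h2.getD c 0 ≥ 1 := fun c hcq => le_trans (hq c hcq) (hmono c)
      have hdrop2 : ∀ c ∈ dropped ++ pre, h2.getD c 0 > 1 := by
        intro c hcm
        rcases List.mem_append.mp hcm with hcm | hcm
        · exact lt_of_lt_of_le (hdrop c hcm) (hmono c)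
        · exact hpre c hcm
      have hfind : firstUnique h2 (dropped ++ q) =
          List.find? (fun c => h2.getD c 0 == 1) (pruneA h2 q) := by
        rw [firstUnique]
        conv_lhs => rw [hqe]
        rw [← List.append_assoc]
        apply find?_append_none
        intro x hx
        have hgt := hdrop2 x hx
        show (h2.getD x 0 == 1) = false
        rw [beq_eq_false_iff_ne]
        omega
      have hstepA : stepA (q, h, ans) val =
          (pruneA h2 q, h2, match pruneA h2 q with
            | c :: _ => ans.push c
            | [] => ans.push '#') := by
        cases hpr' : pruneA h2 q <;> simp [stepA, hc, ← hh2, hpr']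
      have hstepB : stepB (h, dropped ++ q, ans) val =
          (h2, dropped ++ q, match firstUnique h2 (dropped ++ q) with
            | some c => ans.push c
            | none => ans.push '#') := by
        cases hf : firstUnique h2 (dropped ++ q) <;> simp [stepB, hc, ← hh2, hf]
      rw [hstepA, hstepB]
      cases hpr : pruneA h2 q with
      | nil =>
        have : firstUnique h2 (dropped ++ q) = none := by rw [hfind, hpr]; rfl
        rw [this]
        have := ih [] h2 (dropped ++ q) (ans.push '#') (by
          intro c hcm
          rcases List.mem_append.mp hcm with hcm | hcm
          · exact lt_of_lt_of_le (hdrop c hcm) (hmono c)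
          · have hcq' : c ∈ pre := by
              have := hqe; rw [hpr, List.append_nil] at this; exact this ▸ hcm
            exact hpre c hcq')
          (by simp) (by simp)
        simpa using this
      | cons c rest =>
        have hc1 : h2.getD c 0 = 1 := by
          have h1 : h2.getD c 0 ≥ 1 := by
            apply hq2
            rw [hqe, hpr]; exact List.mem_append.mpr (Or.inr (by simp))
          have h2' := hph c rest hpr
          omega
        have : firstUnique h2 (dropped ++ q) = some c := by
          rw [hfind, hpr, List.find?_cons]
          simp [hc1]
        rw [this]
        have hdq : dropped ++ q = (dropped ++ pre) ++ pruneA h2 q := by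
          conv_lhs => rw [hqe]
          rw [← List.append_assoc]
        rw [hdq, hpr]
        have hih := ih (c :: rest) h2 (dropped ++ pre) (ans.push c) hdrop2
          (by intro x hx; apply hq2; rw [hqe, hpr]; exact List.mem_append.mpr (Or.inr hx))
          (by intro x r hx; cases hx; exact hc1)
        simpa using hih
    · -- new character: both insert count 1; A appends to queue, B appends to order
      have hcf : h.contains val = false := by simpa using hc
      set h2 := h.insert val 1 with hh2
      have hval0 : h.getD val 0 = 0 := PySem.Dict.getD_of_not_contains h 0 hcf
      have hne : ∀ c, h.getD c 0 ≥ 1 → c ≠ val := by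
        intro c hcg he; rw [he, hval0] at hcg; omega
      have hget : ∀ c, c ≠ val → h2.getD c 0 = h.getD c 0 := by
        intro c hcv; rw [hh2, PySem.Dict.getD_insert, if_neg hcv]
      have hvget : h2.getD val 0 = 1 := by rw [hh2, PySem.Dict.getD_insert, if_pos rfl]
      have hdrop2 : ∀ c ∈ dropped, h2.getD c 0 > 1 := by
        intro c hcm
        have := hdrop c hcm
        rw [hget c (hne c (by omega))]; exact this
      have hq2 : ∀ c ∈ q ++ [val], h2.getD c 0 ≥ 1 := by
        intro c hcm
        rcases List.mem_append.mp hcm with hcm | hcm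
        · have := hq c hcm; rw [hget c (hne c this)]; exact this
        · simp at hcm; rw [hcm, hvget]
      have hhead2 : ∀ c rest, q ++ [val] = c :: rest → h2.getD c 0 = 1 := by
        intro c rest he
        cases q with
        | nil => simp at he; rw [← he.1, hvget]
        | cons a t =>
          simp only [List.cons_append, List.cons.injEq] at he
          have h1 := hhead a t rfl
          rw [← he.1, hget a (hne a (by omega))]; exact h1
      have hfind : firstUnique h2 (dropped ++ q ++ [val]) =
          List.find? (fun c => h2.getD c 0 == 1) (q ++ [val]) := by
        rw [firstUnique, List.append_assoc]
        apply find?_append_none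
        intro x hx
        have hgt := hdrop2 x hx
        show (h2.getD x 0 == 1) = false
        rw [beq_eq_false_iff_ne]
        omega
      have hstepA : stepA (q, h, ans) val =
          (q ++ [val], h2, match q ++ [val] with
            | c :: _ => ans.push c
            | [] => ans.push '#') := by
        cases hqv' : q ++ [val] <;> simp [stepA, hcf, ← hh2, hqv']
      have hstepB : stepB (h, dropped ++ q, ans) val =
          (h2, dropped ++ (q ++ [val]), match firstUnique h2 (dropped ++ (q ++ [val])) with
            | some c => ans.push c
            | none => ans.push '#') := by
        cases hf : firstUnique h2 (dropped ++ (q ++ [val])) <;> simp [stepB, hcf, ← hh2, hf]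
      rw [hstepA, hstepB]
      cases hqv : q ++ [val] with
      | nil => exact absurd hqv (by simp)
      | cons a t =>
        have ha1 : h2.getD a 0 = 1 := hhead2 a t hqv
        have hfu : firstUnique h2 (dropped ++ (q ++ [val])) = some a := by
          rw [← List.append_assoc, hfind, hqv, List.find?_cons]
          simp [ha1]
        rw [hqv] at hfu
        rw [hfu]
        show (List.foldl stepA (a :: t, h2, ans.push a) l).2.2 =
          (List.foldl stepB (h2, dropped ++ (a :: t), ans.push a) l).2.2
        rw [← hqv]
        exact ih (q ++ [val]) h2 dropped (ans.push a) hdrop2 hq2 hhead2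

-- ===== VERDICT (by name: the statement is the Claim_ definition above) =====
theorem solve_spec : Claim_equal_solve := by
  intro A _
  unfold Spec_solve solve solve_alt
  exact main_lemma A.toList [] PySem.Dict.empty [] "" (by simp) (by simp) (by simp)
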